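-- pv_equiv track=rewrite | github.com/AnirudhBhanot/flashnew | flashnew-main/data_validation_pipeline.py | _standardize_location
-- ===== SOURCE A (Python) =====
-- def _standardize_location(location: str) -> str:
--     """Standardize location format"""
--     if not location:
--         return location
--
--     # Common replacements
--     replacements = {
--         'SF': 'San Francisco',
--         'NYC': 'New York City',
--         'LA': 'Los Angeles',
--         'UK': 'United Kingdom',
--         'USA': 'United States'
--     }
--
--     for abbr, full in replacements.items():
--         location = location.replace(abbr, full)
--
--     return location.strip()
-- ===== SOURCE B (Python) =====
-- import re
--
-- _REPLACEMENTS = {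
--     'SF': 'San Francisco',
--     'NYC': 'New York City',
--     'LA': 'Los Angeles',
--     'UK': 'United Kingdom',
--     'USA': 'United States',
-- }
--
-- _PATTERN = re.compile('|'.join(re.escape(k) for k in _REPLACEMENTS))
--
--
-- def _standardize_location(location: str) -> str:
--     """Standardize location format"""
--     if not location:
--         return location
--     return _PATTERN.sub(lambda m: _REPLACEMENTS[m.group(0)], location).strip()
-- ===== Notes on version B (the rewrite author's own statement) =====
-- stated objective: idiomatic
-- what changed: B compiles one regex alternation of the abbreviation keys and performs a single left-to-right substitution pass with a dict lookup per match, instead of A's five sequential full-string replace passes; equivalent because no key occurs in another key or in any replacement text.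
import Mathlib
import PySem

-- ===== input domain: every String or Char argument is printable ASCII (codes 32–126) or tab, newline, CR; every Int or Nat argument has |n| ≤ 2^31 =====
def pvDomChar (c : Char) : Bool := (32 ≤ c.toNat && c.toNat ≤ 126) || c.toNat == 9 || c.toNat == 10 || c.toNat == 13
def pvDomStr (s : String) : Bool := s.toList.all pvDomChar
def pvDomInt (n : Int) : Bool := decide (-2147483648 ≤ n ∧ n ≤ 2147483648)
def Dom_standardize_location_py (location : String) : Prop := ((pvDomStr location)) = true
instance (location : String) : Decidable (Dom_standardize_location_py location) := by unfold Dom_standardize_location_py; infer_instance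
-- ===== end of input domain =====

-- B replaces A's five sequential str.replace passes by one left-to-right substitution pass over the
-- string (the compiled regex alternation of the abbreviation keys); equal because no key occurs
-- inside another key or inside any replacement text.


-- ===== PORT A =====
def standardize_location_py (location : String) : String :=
  if location = "" then location
  else
    -- for abbr, full in replacements.items(): location = location.replace(abbr, full)
    let l1 := PySem.Str.replace location "SF" "San Francisco"
    let l2 := PySem.Str.replace l1 "NYC" "New York City"
    let l3 := PySem.Str.replace l2 "LA" "Los Angeles"
    let l4 := PySem.Str.replace l3 "UK" "United Kingdom"
    let l5 := PySem.Str.replace l4 "USA" "United States"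
    PySem.Str.strip l5

-- ===== PORT B =====
-- the regex keys (in dict order = the alternation order of the compiled pattern) and their replacements
def pvKeySF : List Char := ['S', 'F']
def pvKeyNYC : List Char := ['N', 'Y', 'C']
def pvKeyLA : List Char := ['L', 'A']
def pvKeyUK : List Char := ['U', 'K']
def pvKeyUSA : List Char := ['U', 'S', 'A']
def pvRepSF : List Char := "San Francisco".toList
def pvRepNYC : List Char := "New York City".toList
def pvRepLA : List Char := "Los Angeles".toList
def pvRepUK : List Char := "United Kingdom".toList
def pvRepUSA : List Char := "United States".toList

-- hand port of _PATTERN.sub(lambda m: _REPLACEMENTS[m.group(0)], location): exact, because an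
-- alternation of literal strings matches, at each position left to right, the first alternative
-- that is a prefix there, emits its replacement and resumes after the match, else copies the char.
def pvScanB (l : List Char) : List Char :=
  match l with
  | [] => []
  | c :: t =>
    if pvKeySF.isPrefixOf (c :: t) then pvRepSF ++ pvScanB ((c :: t).drop 2)
    else if pvKeyNYC.isPrefixOf (c :: t) then pvRepNYC ++ pvScanB ((c :: t).drop 3)
    else if pvKeyLA.isPrefixOf (c :: t) then pvRepLA ++ pvScanB ((c :: t).drop 2)
    else if pvKeyUK.isPrefixOf (c :: t) then pvRepUK ++ pvScanB ((c :: t).drop 2)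
    else if pvKeyUSA.isPrefixOf (c :: t) then pvRepUSA ++ pvScanB ((c :: t).drop 3)
    else c :: pvScanB t
termination_by l.length
decreasing_by all_goals simp

def standardize_location_py_alt (location : String) : String :=
  if location = "" then location
  else PySem.Str.strip (String.ofList (pvScanB location.toList))

-- ===== PRECONDITION & SPEC =====
def Spec_standardize_location_py (location : String) (out : String) : Prop := out = standardize_location_py_alt location
instance (location : String) (out : String) : Decidable (Spec_standardize_location_py location out) := by unfold Spec_standardize_location_py; infer_instance

-- ===== CLAIM (what is proved, stated in full; the proofs are below) =====
def Claim_equal_standardize_location_py : Prop := ∀ (location : String), Dom_standardize_location_py location → Spec_standardize_location_py location (standardize_location_py location)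

-- ===== LEMMAS AND PROOFS =====

-- clean recursion equal to PySem.Chars.replace for a nonempty pattern (proof-side only)
def pvRepl (old new : List Char) (l : List Char) : List Char :=
  match l with
  | [] => []
  | c :: t =>
    if old.isPrefixOf (c :: t) then new ++ pvRepl old new ((c :: t).drop (max old.length 1))
    else c :: pvRepl old new t
termination_by l.length
decreasing_by all_goals simp

theorem pv_go_eq (old new : List Char) (hne : old ≠ []) :
    ∀ (fuel : Nat) (l acc : List Char), l.length ≤ fuel →
      PySem.Chars.replace.go old new fuel l acc = acc.reverse ++ pvRepl old new l := by
  intro fuel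
  induction fuel with
  | zero =>
    intro l acc h
    have : l = [] := by
      cases l with
      | nil => rfl
      | cons c t => simp at h
    subst this
    simp [PySem.Chars.replace.go, pvRepl]
  | succ n ih =>
    intro l acc h
    cases l with
    | nil => simp [PySem.Chars.replace.go, pvRepl]
    | cons c t =>
      rw [PySem.Chars.replace.go]
      by_cases hp : old.isPrefixOf (c :: t)
      · rw [if_pos hp]
        have hol : 1 ≤ old.length := by
          cases old with
          | nil => exact absurd rfl hne
          | cons a b => simp
        have hlen : (List.drop old.length (c :: t)).length ≤ n := by
          simp at h ⊢; omega
        rw [ih _ _ hlen, pvRepl, if_pos hp]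
        have hmax : max old.length 1 = old.length := by omega
        simp [hmax]
      · rw [if_neg hp]
        have hlen : t.length ≤ n := by simp at h; omega
        rw [ih _ _ hlen, pvRepl, if_neg hp]
        simp

theorem pv_replace_eq (s old new : List Char) (hne : old ≠ []) :
    PySem.Chars.replace s old new = pvRepl old new s := by
  rw [PySem.Chars.replace, if_neg (by simp [hne])]
  simpa using pv_go_eq old new hne s.length s [] le_rfl

def pvChain (l : List Char) : List Char :=
  pvRepl pvKeyUSA pvRepUSA (pvRepl pvKeyUK pvRepUK (pvRepl pvKeyLA pvRepLA
    (pvRepl pvKeyNYC pvRepNYC (pvRepl pvKeySF pvRepSF l))))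

theorem pvRepl_nil (old new : List Char) : pvRepl old new [] = [] := by rw [pvRepl]

theorem pvRepl_neg (old new : List Char) (c : Char) (t : List Char)
    (h : ¬ old <+: (c :: t)) : pvRepl old new (c :: t) = c :: pvRepl old new t := by
  rw [pvRepl, if_neg (by simpa [List.isPrefixOf_iff_prefix] using h)]

theorem pvRepl_pos (old new : List Char) (c : Char) (t : List Char)
    (h : old <+: (c :: t)) :
    pvRepl old new (c :: t) = new ++ pvRepl old new ((c :: t).drop (max old.length 1)) := by
  rw [pvRepl, if_pos (by simpa [List.isPrefixOf_iff_prefix] using h)]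

theorem pv_head (old new : List Char) (hnew : new ≠ []) (l : List Char) (ch : Char)
    (h : (pvRepl old new l).head? = some ch) :
    (old <+: l ∧ new.head? = some ch) ∨ l.head? = some ch := by
  cases l with
  | nil => rw [pvRepl_nil] at h; simp at h
  | cons c t =>
    rw [pvRepl] at h
    split at h
    · rename_i hp
      left
      refine ⟨List.isPrefixOf_iff_prefix.mp hp, ?_⟩
      cases new with
      | nil => exact absurd rfl hnew
      | cons a b => simpa using h
    · right; simpa using h

theorem pv_head_prefix (a : Char) (l : List Char) : [a] <+: l ↔ l.head? = some a := by
  cases l with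
  | nil => simp
  | cons b t => simp [List.cons_prefix_cons, eq_comm]

theorem pv_prefix_head (a : Char) (p l : List Char) (h : (a :: p) <+: l) :
    l.head? = some a := by
  cases l with
  | nil => simp at h
  | cons b t =>
    rw [List.cons_prefix_cons] at h
    simp [h.1]

-- push lemmas: a later pattern never matches inside or at the boundary of an earlier replacement
theorem pv_push_SF_NYC (x : List Char) :
    pvRepl pvKeyNYC pvRepNYC (pvRepSF ++ x) = pvRepSF ++ pvRepl pvKeyNYC pvRepNYC x := by
  show pvRepl pvKeyNYC _ ('S'::'a'::'n'::' '::'F'::'r'::'a'::'n'::'c'::'i'::'s'::'c'::'o'::x) = _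
  simp [pvRepl, pvKeyNYC, List.isPrefixOf, pvRepSF]
theorem pv_push_SF_LA (x : List Char) :
    pvRepl pvKeyLA pvRepLA (pvRepSF ++ x) = pvRepSF ++ pvRepl pvKeyLA pvRepLA x := by
  show pvRepl pvKeyLA _ ('S'::'a'::'n'::' '::'F'::'r'::'a'::'n'::'c'::'i'::'s'::'c'::'o'::x) = _
  simp [pvRepl, pvKeyLA, List.isPrefixOf, pvRepSF]
theorem pv_push_SF_UK (x : List Char) :
    pvRepl pvKeyUK pvRepUK (pvRepSF ++ x) = pvRepSF ++ pvRepl pvKeyUK pvRepUK x := by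
  show pvRepl pvKeyUK _ ('S'::'a'::'n'::' '::'F'::'r'::'a'::'n'::'c'::'i'::'s'::'c'::'o'::x) = _
  simp [pvRepl, pvKeyUK, List.isPrefixOf, pvRepSF]
theorem pv_push_SF_USA (x : List Char) :
    pvRepl pvKeyUSA pvRepUSA (pvRepSF ++ x) = pvRepSF ++ pvRepl pvKeyUSA pvRepUSA x := by
  show pvRepl pvKeyUSA _ ('S'::'a'::'n'::' '::'F'::'r'::'a'::'n'::'c'::'i'::'s'::'c'::'o'::x) = _
  simp [pvRepl, pvKeyUSA, List.isPrefixOf, pvRepSF]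
theorem pv_push_NYC_LA (x : List Char) :
    pvRepl pvKeyLA pvRepLA (pvRepNYC ++ x) = pvRepNYC ++ pvRepl pvKeyLA pvRepLA x := by
  show pvRepl pvKeyLA _ ('N'::'e'::'w'::' '::'Y'::'o'::'r'::'k'::' '::'C'::'i'::'t'::'y'::x) = _
  simp [pvRepl, pvKeyLA, List.isPrefixOf, pvRepNYC]
theorem pv_push_NYC_UK (x : List Char) :
    pvRepl pvKeyUK pvRepUK (pvRepNYC ++ x) = pvRepNYC ++ pvRepl pvKeyUK pvRepUK x := by
  show pvRepl pvKeyUK _ ('N'::'e'::'w'::' '::'Y'::'o'::'r'::'k'::' '::'C'::'i'::'t'::'y'::x) = _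
  simp [pvRepl, pvKeyUK, List.isPrefixOf, pvRepNYC]
theorem pv_push_NYC_USA (x : List Char) :
    pvRepl pvKeyUSA pvRepUSA (pvRepNYC ++ x) = pvRepNYC ++ pvRepl pvKeyUSA pvRepUSA x := by
  show pvRepl pvKeyUSA _ ('N'::'e'::'w'::' '::'Y'::'o'::'r'::'k'::' '::'C'::'i'::'t'::'y'::x) = _
  simp [pvRepl, pvKeyUSA, List.isPrefixOf, pvRepNYC]
theorem pv_push_LA_UK (x : List Char) :
    pvRepl pvKeyUK pvRepUK (pvRepLA ++ x) = pvRepLA ++ pvRepl pvKeyUK pvRepUK x := by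
  show pvRepl pvKeyUK _ ('L'::'o'::'s'::' '::'A'::'n'::'g'::'e'::'l'::'e'::'s'::x) = _
  simp [pvRepl, pvKeyUK, List.isPrefixOf, pvRepLA]
theorem pv_push_LA_USA (x : List Char) :
    pvRepl pvKeyUSA pvRepUSA (pvRepLA ++ x) = pvRepLA ++ pvRepl pvKeyUSA pvRepUSA x := by
  show pvRepl pvKeyUSA _ ('L'::'o'::'s'::' '::'A'::'n'::'g'::'e'::'l'::'e'::'s'::x) = _
  simp [pvRepl, pvKeyUSA, List.isPrefixOf, pvRepLA]
theorem pv_push_UK_USA (x : List Char) :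
    pvRepl pvKeyUSA pvRepUSA (pvRepUK ++ x) = pvRepUK ++ pvRepl pvKeyUSA pvRepUSA x := by
  show pvRepl pvKeyUSA _ ('U'::'n'::'i'::'t'::'e'::'d'::' '::'K'::'i'::'n'::'g'::'d'::'o'::'m'::x) = _
  simp [pvRepl, pvKeyUSA, List.isPrefixOf, pvRepUK]

-- chain steps: what the five sequential replaces do where a key matches
theorem pv_chain_SF (r : List Char) : pvChain ('S'::'F'::r) = pvRepSF ++ pvChain r := by
  unfold pvChain
  rw [pvRepl_pos pvKeySF pvRepSF 'S' ('F'::r) (by simp [pvKeySF, List.cons_prefix_cons])]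
  have hdrop : (('S'::'F'::r).drop (max pvKeySF.length 1)) = r := by simp [pvKeySF]
  rw [hdrop, pv_push_SF_NYC, pv_push_SF_LA, pv_push_SF_UK, pv_push_SF_USA]

theorem pv_chain_NYC (r : List Char) : pvChain ('N'::'Y'::'C'::r) = pvRepNYC ++ pvChain r := by
  unfold pvChain
  rw [pvRepl_neg pvKeySF pvRepSF 'N' ('Y'::'C'::r) (by simp [pvKeySF, List.cons_prefix_cons]),
      pvRepl_neg pvKeySF pvRepSF 'Y' ('C'::r) (by simp [pvKeySF, List.cons_prefix_cons]),
      pvRepl_neg pvKeySF pvRepSF 'C' r (by simp [pvKeySF, List.cons_prefix_cons])]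
  rw [pvRepl_pos pvKeyNYC pvRepNYC 'N' ('Y'::'C'::pvRepl pvKeySF pvRepSF r)
      (by simp [pvKeyNYC, List.cons_prefix_cons])]
  have hdrop : (('N'::'Y'::'C'::pvRepl pvKeySF pvRepSF r).drop (max pvKeyNYC.length 1))
      = pvRepl pvKeySF pvRepSF r := by simp [pvKeyNYC]
  rw [hdrop, pv_push_NYC_LA, pv_push_NYC_UK, pv_push_NYC_USA]

theorem pv_chain_LA (r : List Char) : pvChain ('L'::'A'::r) = pvRepLA ++ pvChain r := by
  unfold pvChain
  rw [pvRepl_neg pvKeySF pvRepSF 'L' ('A'::r) (by simp [pvKeySF, List.cons_prefix_cons]),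
      pvRepl_neg pvKeySF pvRepSF 'A' r (by simp [pvKeySF, List.cons_prefix_cons])]
  rw [pvRepl_neg pvKeyNYC pvRepNYC 'L' _ (by simp [pvKeyNYC, List.cons_prefix_cons]),
      pvRepl_neg pvKeyNYC pvRepNYC 'A' _ (by simp [pvKeyNYC, List.cons_prefix_cons])]
  rw [pvRepl_pos pvKeyLA pvRepLA 'L' _ (by simp [pvKeyLA, List.cons_prefix_cons])]
  have hdrop : (('L'::'A'::pvRepl pvKeyNYC pvRepNYC (pvRepl pvKeySF pvRepSF r)).drop
      (max pvKeyLA.length 1)) = pvRepl pvKeyNYC pvRepNYC (pvRepl pvKeySF pvRepSF r) := by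
    simp [pvKeyLA]
  rw [hdrop, pv_push_LA_UK, pv_push_LA_USA]

theorem pv_chain_UK (r : List Char) : pvChain ('U'::'K'::r) = pvRepUK ++ pvChain r := by
  unfold pvChain
  rw [pvRepl_neg pvKeySF pvRepSF 'U' ('K'::r) (by simp [pvKeySF, List.cons_prefix_cons]),
      pvRepl_neg pvKeySF pvRepSF 'K' r (by simp [pvKeySF, List.cons_prefix_cons])]
  rw [pvRepl_neg pvKeyNYC pvRepNYC 'U' _ (by simp [pvKeyNYC, List.cons_prefix_cons]),
      pvRepl_neg pvKeyNYC pvRepNYC 'K' _ (by simp [pvKeyNYC, List.cons_prefix_cons])]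
  rw [pvRepl_neg pvKeyLA pvRepLA 'U' _ (by simp [pvKeyLA, List.cons_prefix_cons]),
      pvRepl_neg pvKeyLA pvRepLA 'K' _ (by simp [pvKeyLA, List.cons_prefix_cons])]
  rw [pvRepl_pos pvKeyUK pvRepUK 'U' _ (by simp [pvKeyUK, List.cons_prefix_cons])]
  have hdrop : (('U'::'K'::pvRepl pvKeyLA pvRepLA (pvRepl pvKeyNYC pvRepNYC (pvRepl pvKeySF pvRepSF r))).drop
      (max pvKeyUK.length 1)) = pvRepl pvKeyLA pvRepLA (pvRepl pvKeyNYC pvRepNYC (pvRepl pvKeySF pvRepSF r)) := by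
    simp [pvKeyUK]
  rw [hdrop, pv_push_UK_USA]

theorem pv_chain_USA (r : List Char) : pvChain ('U'::'S'::'A'::r) = pvRepUSA ++ pvChain r := by
  unfold pvChain
  rw [pvRepl_neg pvKeySF pvRepSF 'U' ('S'::'A'::r) (by simp [pvKeySF, List.cons_prefix_cons]),
      pvRepl_neg pvKeySF pvRepSF 'S' ('A'::r) (by simp [pvKeySF, List.cons_prefix_cons]),
      pvRepl_neg pvKeySF pvRepSF 'A' r (by simp [pvKeySF, List.cons_prefix_cons])]
  rw [pvRepl_neg pvKeyNYC pvRepNYC 'U' _ (by simp [pvKeyNYC, List.cons_prefix_cons]),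
      pvRepl_neg pvKeyNYC pvRepNYC 'S' _ (by simp [pvKeyNYC, List.cons_prefix_cons]),
      pvRepl_neg pvKeyNYC pvRepNYC 'A' _ (by simp [pvKeyNYC, List.cons_prefix_cons])]
  rw [pvRepl_neg pvKeyLA pvRepLA 'U' _ (by simp [pvKeyLA, List.cons_prefix_cons]),
      pvRepl_neg pvKeyLA pvRepLA 'S' _ (by simp [pvKeyLA, List.cons_prefix_cons]),
      pvRepl_neg pvKeyLA pvRepLA 'A' _ (by simp [pvKeyLA, List.cons_prefix_cons])]
  rw [pvRepl_neg pvKeyUK pvRepUK 'U' _ (by simp [pvKeyUK, List.cons_prefix_cons]),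
      pvRepl_neg pvKeyUK pvRepUK 'S' _ (by simp [pvKeyUK, List.cons_prefix_cons]),
      pvRepl_neg pvKeyUK pvRepUK 'A' _ (by simp [pvKeyUK, List.cons_prefix_cons])]
  rw [pvRepl_pos pvKeyUSA pvRepUSA 'U' _ (by simp [pvKeyUSA, List.cons_prefix_cons])]
  have hdrop : (('U'::'S'::'A'::pvRepl pvKeyUK pvRepUK (pvRepl pvKeyLA pvRepLA (pvRepl pvKeyNYC pvRepNYC (pvRepl pvKeySF pvRepSF r)))).drop
      (max pvKeyUSA.length 1)) = pvRepl pvKeyUK pvRepUK (pvRepl pvKeyLA pvRepLA (pvRepl pvKeyNYC pvRepNYC (pvRepl pvKeySF pvRepSF r))) := by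
    simp [pvKeyUSA]
  rw [hdrop]

theorem pv_default (c : Char) (t : List Char)
    (h1 : ¬ pvKeySF <+: (c :: t)) (h2 : ¬ pvKeyNYC <+: (c :: t))
    (h3 : ¬ pvKeyLA <+: (c :: t)) (h4 : ¬ pvKeyUK <+: (c :: t))
    (h5 : ¬ pvKeyUSA <+: (c :: t)) :
    pvChain (c :: t) = c :: pvChain t := by
  have hb : ¬ pvKeyNYC <+: (c :: pvRepl pvKeySF pvRepSF t) := by
    intro hpre
    obtain ⟨hcN, hYC⟩ : 'N' = c ∧ ['Y', 'C'] <+: pvRepl pvKeySF pvRepSF t := by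
      simpa [pvKeyNYC, List.cons_prefix_cons] using hpre
    subst hcN
    have h2' : ¬ ['Y', 'C'] <+: t := by
      intro hx
      exact h2 (by simp [pvKeyNYC, List.cons_prefix_cons]; exact hx)
    have hY := pv_prefix_head 'Y' ['C'] _ hYC
    rcases pv_head _ _ (by decide) t 'Y' hY with ⟨_, hh⟩ | hth
    · exact absurd hh (by decide)
    · cases t with
      | nil => simp at hth
      | cons d u =>
        have hd' : d = 'Y' := by simpa using hth
        subst hd'
        rw [pvRepl_neg _ _ _ _ (by simp [pvKeySF, List.cons_prefix_cons])] at hYC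
        have hC : (pvRepl pvKeySF pvRepSF u).head? = some 'C' := by
          rw [← pv_head_prefix]
          rw [List.cons_prefix_cons] at hYC
          exact hYC.2
        rcases pv_head _ _ (by decide) u 'C' hC with ⟨_, hh⟩ | hth2
        · exact absurd hh (by decide)
        · exact h2' (by rw [List.cons_prefix_cons]; exact ⟨rfl, (pv_head_prefix 'C' u).mpr hth2⟩)
  have hc3 : ¬ pvKeyLA <+: (c :: pvRepl pvKeyNYC pvRepNYC (pvRepl pvKeySF pvRepSF t)) := by
    intro hpre
    obtain ⟨hcL, hA⟩ : 'L' = c ∧ ['A'] <+: pvRepl pvKeyNYC pvRepNYC (pvRepl pvKeySF pvRepSF t) := by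
      simpa [pvKeyLA, List.cons_prefix_cons] using hpre
    subst hcL
    have h3' : t.head? ≠ some 'A' := by
      intro hx
      exact h3 (by simp [pvKeyLA, List.cons_prefix_cons, pv_head_prefix]; exact hx)
    have hAh := (pv_head_prefix 'A' _).mp hA
    rcases pv_head _ _ (by decide) _ 'A' hAh with ⟨_, hh⟩ | h2h
    · exact absurd hh (by decide)
    · rcases pv_head _ _ (by decide) t 'A' h2h with ⟨_, hh⟩ | h3h
      · exact absurd hh (by decide)
      · exact h3' h3h
  have hd : ¬ pvKeyUK <+: (c :: pvRepl pvKeyLA pvRepLA (pvRepl pvKeyNYC pvRepNYC (pvRepl pvKeySF pvRepSF t))) := by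
    intro hpre
    obtain ⟨hcU, hK⟩ : 'U' = c ∧ ['K'] <+: pvRepl pvKeyLA pvRepLA (pvRepl pvKeyNYC pvRepNYC (pvRepl pvKeySF pvRepSF t)) := by
      simpa [pvKeyUK, List.cons_prefix_cons] using hpre
    subst hcU
    have h4' : t.head? ≠ some 'K' := by
      intro hx
      exact h4 (by simp [pvKeyUK, List.cons_prefix_cons, pv_head_prefix]; exact hx)
    have hKh := (pv_head_prefix 'K' _).mp hK
    rcases pv_head _ _ (by decide) _ 'K' hKh with ⟨_, hh⟩ | h2h
    · exact absurd hh (by decide)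
    · rcases pv_head _ _ (by decide) _ 'K' h2h with ⟨_, hh⟩ | h3h
      · exact absurd hh (by decide)
      · rcases pv_head _ _ (by decide) t 'K' h3h with ⟨_, hh⟩ | h4h
        · exact absurd hh (by decide)
        · exact h4' h4h
  have he : ¬ pvKeyUSA <+: (c :: pvRepl pvKeyUK pvRepUK (pvRepl pvKeyLA pvRepLA (pvRepl pvKeyNYC pvRepNYC (pvRepl pvKeySF pvRepSF t)))) := by
    intro hpre
    obtain ⟨hcU, hSA⟩ : 'U' = c ∧ ['S', 'A'] <+: pvRepl pvKeyUK pvRepUK (pvRepl pvKeyLA pvRepLA (pvRepl pvKeyNYC pvRepNYC (pvRepl pvKeySF pvRepSF t))) := by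
      simpa [pvKeyUSA, List.cons_prefix_cons] using hpre
    subst hcU
    have h5' : ¬ ['S', 'A'] <+: t := by
      intro hx
      exact h5 (by simp [pvKeyUSA, List.cons_prefix_cons] at hx ⊢; exact hx)
    by_cases hSFt : pvKeySF <+: t
    · obtain ⟨r, hr⟩ := hSFt
      have ht : t = 'S'::'F'::r := by rw [← hr]; rfl
      rw [ht] at hSA
      rw [pvRepl_pos _ _ _ _ (by simp [pvKeySF, List.cons_prefix_cons])] at hSA
      have hdrop : (('S'::'F'::r).drop (max pvKeySF.length 1)) = r := by simp [pvKeySF]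
      rw [hdrop, pv_push_SF_NYC, pv_push_SF_LA, pv_push_SF_UK] at hSA
      rw [show (pvRepSF ++ pvRepl pvKeyUK pvRepUK (pvRepl pvKeyLA pvRepLA (pvRepl pvKeyNYC pvRepNYC (pvRepl pvKeySF pvRepSF r))))
          = 'S'::'a'::'n'::' '::'F'::'r'::'a'::'n'::'c'::'i'::'s'::'c'::'o'::(pvRepl pvKeyUK pvRepUK (pvRepl pvKeyLA pvRepLA (pvRepl pvKeyNYC pvRepNYC (pvRepl pvKeySF pvRepSF r)))) from rfl] at hSA
      simp [List.cons_prefix_cons] at hSA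
    · by_cases hSh : t.head? = some 'S'
      · cases t with
        | nil => simp at hSh
        | cons d u =>
          have hd' : d = 'S' := by simpa using hSh
          subst hd'
          rw [pvRepl_neg _ _ _ _ hSFt] at hSA
          rw [pvRepl_neg _ _ _ _ (by simp [pvKeyNYC, List.cons_prefix_cons])] at hSA
          rw [pvRepl_neg _ _ _ _ (by simp [pvKeyLA, List.cons_prefix_cons])] at hSA
          rw [pvRepl_neg _ _ _ _ (by simp [pvKeyUK, List.cons_prefix_cons])] at hSA
          rw [List.cons_prefix_cons] at hSA
          have hA2 := (pv_head_prefix 'A' _).mp hSA.2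
          have h5'' : u.head? ≠ some 'A' := by
            intro hx
            exact h5' (by rw [List.cons_prefix_cons]; exact ⟨rfl, (pv_head_prefix 'A' u).mpr hx⟩)
          rcases pv_head _ _ (by decide) _ 'A' hA2 with ⟨_, hh⟩ | h2h
          · exact absurd hh (by decide)
          · rcases pv_head _ _ (by decide) _ 'A' h2h with ⟨_, hh⟩ | h3h
            · exact absurd hh (by decide)
            · rcases pv_head _ _ (by decide) _ 'A' h3h with ⟨_, hh⟩ | h4h
              · exact absurd hh (by decide)
              · rcases pv_head _ _ (by decide) u 'A' h4h with ⟨_, hh⟩ | h5h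
                · exact absurd hh (by decide)
                · exact h5'' h5h
      · have hH := pv_prefix_head 'S' ['A'] _ hSA
        rcases pv_head _ _ (by decide) _ 'S' hH with ⟨_, hh⟩ | h2h
        · exact absurd hh (by decide)
        · rcases pv_head _ _ (by decide) _ 'S' h2h with ⟨_, hh⟩ | h3h
          · exact absurd hh (by decide)
          · rcases pv_head _ _ (by decide) _ 'S' h3h with ⟨_, hh⟩ | h4h
            · exact absurd hh (by decide)
            · rcases pv_head _ _ (by decide) t 'S' h4h with ⟨hp, _⟩ | h5h
              · exact hSFt hp
              · exact hSh h5h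
  unfold pvChain
  rw [pvRepl_neg _ _ _ _ h1, pvRepl_neg _ _ _ _ hb, pvRepl_neg _ _ _ _ hc3,
      pvRepl_neg _ _ _ _ hd, pvRepl_neg _ _ _ _ he]


-- scan steps: what one pass of B's substitution scan does at each kind of position
theorem pv_scan_nil : pvScanB [] = [] := by rw [pvScanB]

theorem pv_scan_SF (r : List Char) : pvScanB ('S'::'F'::r) = pvRepSF ++ pvScanB r := by
  rw [pvScanB]
  simp [pvKeySF, List.isPrefixOf]

theorem pv_scan_NYC (r : List Char) : pvScanB ('N'::'Y'::'C'::r) = pvRepNYC ++ pvScanB r := by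
  rw [pvScanB]
  simp [pvKeySF, pvKeyNYC, List.isPrefixOf]

theorem pv_scan_LA (r : List Char) : pvScanB ('L'::'A'::r) = pvRepLA ++ pvScanB r := by
  rw [pvScanB]
  simp [pvKeySF, pvKeyNYC, pvKeyLA, List.isPrefixOf]

theorem pv_scan_UK (r : List Char) : pvScanB ('U'::'K'::r) = pvRepUK ++ pvScanB r := by
  rw [pvScanB]
  simp [pvKeySF, pvKeyNYC, pvKeyLA, pvKeyUK, List.isPrefixOf]

theorem pv_scan_USA (r : List Char) : pvScanB ('U'::'S'::'A'::r) = pvRepUSA ++ pvScanB r := by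
  rw [pvScanB]
  simp [pvKeySF, pvKeyNYC, pvKeyLA, pvKeyUK, pvKeyUSA, List.isPrefixOf]

theorem pv_scan_default (c : Char) (t : List Char)
    (h1 : ¬ pvKeySF <+: (c :: t)) (h2 : ¬ pvKeyNYC <+: (c :: t))
    (h3 : ¬ pvKeyLA <+: (c :: t)) (h4 : ¬ pvKeyUK <+: (c :: t))
    (h5 : ¬ pvKeyUSA <+: (c :: t)) :
    pvScanB (c :: t) = c :: pvScanB t := by
  rw [pvScanB,
      if_neg (by simpa [List.isPrefixOf_iff_prefix] using h1),
      if_neg (by simpa [List.isPrefixOf_iff_prefix] using h2),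
      if_neg (by simpa [List.isPrefixOf_iff_prefix] using h3),
      if_neg (by simpa [List.isPrefixOf_iff_prefix] using h4),
      if_neg (by simpa [List.isPrefixOf_iff_prefix] using h5)]

theorem pv_chain_eq_scan (l : List Char) : pvChain l = pvScanB l := by
  have hnil : pvChain [] = pvScanB [] := by
    rw [pv_scan_nil]
    unfold pvChain
    simp [pvRepl_nil]
  have key : ∀ (n : Nat) (m : List Char), m.length ≤ n → pvChain m = pvScanB m := by
    intro n
    induction n with
    | zero =>
      intro m h
      cases m with
      | nil => exact hnil
      | cons c t => simp at h
    | succ n ih =>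
      intro m h
      cases m with
      | nil => exact hnil
      | cons c t =>
        by_cases hSF : pvKeySF <+: (c :: t)
        · obtain ⟨r, hr⟩ := hSF
          have hct : c :: t = 'S'::'F'::r := by rw [← hr]; rfl
          injection hct with hc ht
          subst hc; subst ht
          have hlen : r.length ≤ n := by simp at h; omega
          rw [pv_chain_SF, pv_scan_SF, ih r hlen]
        · by_cases hNYC : pvKeyNYC <+: (c :: t)
          · obtain ⟨r, hr⟩ := hNYC
            have hct : c :: t = 'N'::'Y'::'C'::r := by rw [← hr]; rfl
            injection hct with hc ht
            subst hc; subst ht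
            have hlen : r.length ≤ n := by simp at h; omega
            rw [pv_chain_NYC, pv_scan_NYC, ih r hlen]
          · by_cases hLA : pvKeyLA <+: (c :: t)
            · obtain ⟨r, hr⟩ := hLA
              have hct : c :: t = 'L'::'A'::r := by rw [← hr]; rfl
              injection hct with hc ht
              subst hc; subst ht
              have hlen : r.length ≤ n := by simp at h; omega
              rw [pv_chain_LA, pv_scan_LA, ih r hlen]
            · by_cases hUK : pvKeyUK <+: (c :: t)
              · obtain ⟨r, hr⟩ := hUK
                have hct : c :: t = 'U'::'K'::r := by rw [← hr]; rfl
                injection hct with hc ht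
                subst hc; subst ht
                have hlen : r.length ≤ n := by simp at h; omega
                rw [pv_chain_UK, pv_scan_UK, ih r hlen]
              · by_cases hUSA : pvKeyUSA <+: (c :: t)
                · obtain ⟨r, hr⟩ := hUSA
                  have hct : c :: t = 'U'::'S'::'A'::r := by rw [← hr]; rfl
                  injection hct with hc ht
                  subst hc; subst ht
                  have hlen : r.length ≤ n := by simp at h; omega
                  rw [pv_chain_USA, pv_scan_USA, ih r hlen]
                · have hlen : t.length ≤ n := by simp at h; omega
                  rw [pv_default c t hSF hNYC hLA hUK hUSA,
                      pv_scan_default c t hSF hNYC hLA hUK hUSA, ih t hlen]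
  exact key l.length l le_rfl

-- ===== VERDICT (by name: the statement is the Claim_ definition above) =====
theorem standardize_location_py_spec : Claim_equal_standardize_location_py := by
  intro location _
  unfold Spec_standardize_location_py standardize_location_py standardize_location_py_alt
  by_cases hloc : location = ""
  · simp [hloc]
  · simp only [if_neg hloc]
    simp only [PySem.Str.replace, PySem.Str.strip, String.toList_ofList]
    have e1 : ∀ s : List Char, PySem.Chars.replace s "SF".toList "San Francisco".toList
        = pvRepl pvKeySF pvRepSF s := fun s => pv_replace_eq s _ _ (by decide)
    have e2 : ∀ s : List Char, PySem.Chars.replace s "NYC".toList "New York City".toList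
        = pvRepl pvKeyNYC pvRepNYC s := fun s => pv_replace_eq s _ _ (by decide)
    have e3 : ∀ s : List Char, PySem.Chars.replace s "LA".toList "Los Angeles".toList
        = pvRepl pvKeyLA pvRepLA s := fun s => pv_replace_eq s _ _ (by decide)
    have e4 : ∀ s : List Char, PySem.Chars.replace s "UK".toList "United Kingdom".toList
        = pvRepl pvKeyUK pvRepUK s := fun s => pv_replace_eq s _ _ (by decide)
    have e5 : ∀ s : List Char, PySem.Chars.replace s "USA".toList "United States".toList
        = pvRepl pvKeyUSA pvRepUSA s := fun s => pv_replace_eq s _ _ (by decide)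
    rw [e1, e2, e3, e4, e5]
    rw [show pvRepl pvKeyUSA pvRepUSA (pvRepl pvKeyUK pvRepUK (pvRepl pvKeyLA pvRepLA
        (pvRepl pvKeyNYC pvRepNYC (pvRepl pvKeySF pvRepSF location.toList)))) = pvChain location.toList from rfl]
    rw [pv_chain_eq_scan]
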